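-- pv_equiv track=rewrite | github.com/jerrylususu/advent-of-code-2024 | pysrc/day21p1.py | calc_product_of_all_paths
-- ===== SOURCE A (Python) =====
-- from itertools import product
--
-- def calc_product_of_all_paths(steps_and_keys) -> list[str]:
--     steps = []
--     key_strs = []
--     for step_and_keys in steps_and_keys:
--         step_start, step_end, paths_keys = step_and_keys
--         steps.append((step_start, step_end))
--         step_key_strs = []
--         for keys in paths_keys:
--             step_key_strs.append("".join(keys + ['A']))
--         key_strs.append(step_key_strs)
--
--
--     products = product(*key_strs)
--     final_key_presses = []
--     for product_result in products:
--         final_key_presses.append("".join(product_result))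
--
--     return final_key_presses
-- ===== SOURCE B (Python) =====
-- def calc_product_of_all_paths(steps_and_keys) -> list[str]:
--     # Mixed-radix (odometer) enumeration: count the combinations, then decode
--     # each index 0..total-1 into one choice per step via divmod, instead of
--     # materialising the Cartesian product with itertools.product.
--     opts = [[''.join(keys) + 'A' for keys in paths_keys]
--             for _start, _end, paths_keys in steps_and_keys]
--     total = 1
--     for o in opts:
--         total *= len(o)
--     out = []
--     for idx in range(total):
--         parts = []
--         for o in reversed(opts):
--             idx, d = divmod(idx, len(o))
--             parts.append(o[d])
--         out.append(''.join(reversed(parts)))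
--     return out
-- ===== Notes on version B (the rewrite author's own statement) =====
-- stated objective: alternative
-- what changed: Replaces itertools.product enumeration with mixed-radix index decoding: it counts the total number of combinations and decodes each index 0..total-1 into one per-step choice via divmod, building each output string directly instead of materialising product tuples.
import Mathlib
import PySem

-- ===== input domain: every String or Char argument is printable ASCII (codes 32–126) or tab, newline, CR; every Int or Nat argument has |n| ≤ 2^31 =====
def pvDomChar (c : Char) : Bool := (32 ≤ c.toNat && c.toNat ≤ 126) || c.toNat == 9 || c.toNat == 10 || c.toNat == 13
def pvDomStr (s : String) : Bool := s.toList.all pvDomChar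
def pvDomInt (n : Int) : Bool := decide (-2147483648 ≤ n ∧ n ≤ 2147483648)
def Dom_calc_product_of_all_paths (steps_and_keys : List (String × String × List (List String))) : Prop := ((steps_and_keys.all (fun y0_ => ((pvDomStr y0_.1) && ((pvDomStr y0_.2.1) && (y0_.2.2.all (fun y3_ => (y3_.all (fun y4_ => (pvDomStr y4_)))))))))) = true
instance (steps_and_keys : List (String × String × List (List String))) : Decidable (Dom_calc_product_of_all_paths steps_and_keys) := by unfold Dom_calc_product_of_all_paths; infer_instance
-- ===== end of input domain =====

-- B replaces itertools.product enumeration with mixed-radix index decoding: it counts the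
-- combinations and decodes each index via divmod into one per-step choice (alternative algorithm).


-- ===== PORT A =====
-- itertools.product(*key_strs): leftmost pool varies slowest; product() of no pools
-- yields the single empty tuple.
def pvProduct (lists : List (List String)) : List (List String) :=
  match lists with
  | [] => [[]]
  | pool :: rest => pool.flatMap (fun x => (pvProduct rest).map (fun t => x :: t))

-- The 'steps' list A builds is never used for the return value and is omitted.
def calc_product_of_all_paths (steps_and_keys : List (String × String × List (List String))) : List String :=
  let key_strs := steps_and_keys.foldl (fun acc step_and_keys =>
      let step_key_strs := step_and_keys.2.2.foldl
        (fun a keys => a ++ [PySem.Str.join "" (keys ++ ["A"])]) []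
      acc ++ [step_key_strs]) []
  let products := pvProduct key_strs
  products.foldl (fun acc product_result => acc ++ [PySem.Str.join "" product_result]) []

-- ===== PORT B =====
-- body of B's inner divmod loop: idx, d = divmod(idx, len(o)); parts.append(o[d]).
-- The 'none' branch (len(o) = 0) is never reached when the loop runs: a zero length
-- forces total = 0 and an empty outer range; same for the o[d] default.
def pvStep (st : Int × List String) (o : List String) : Int × List String :=
  match PySem.Int.divmod? st.1 (o.length : Int) with
  | some (q, d) => (q, st.2 ++ [PySem.List.pyGetD o d ""])
  | none => st

-- Mixed-radix decoding of indices 0..total-1 (reversed(opts) = opts.reverse).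
def calc_product_of_all_paths_alt (steps_and_keys : List (String × String × List (List String))) : List String :=
  let opts := steps_and_keys.map (fun x => x.2.2.map (fun keys => PySem.Str.join "" keys ++ "A"))
  let total := opts.foldl (fun t o => t * (o.length : Int)) 1
  (PySem.List.pyRange 0 total 1).foldl (fun out idx =>
    let st := opts.reverse.foldl pvStep (idx, [])
    out ++ [PySem.Str.join "" st.2.reverse]) []

-- ===== PRECONDITION & SPEC =====
def Spec_calc_product_of_all_paths (steps_and_keys : List (String × String × List (List String))) (out : List String) : Prop := out = calc_product_of_all_paths_alt steps_and_keys
instance (steps_and_keys : List (String × String × List (List String))) (out : List String) : Decidable (Spec_calc_product_of_all_paths steps_and_keys out) := by unfold Spec_calc_product_of_all_paths; infer_instance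

-- ===== CLAIM (what is proved, stated in full; the proofs are below) =====
def Claim_equal_calc_product_of_all_paths : Prop := ∀ (steps_and_keys : List (String × String × List (List String))), Dom_calc_product_of_all_paths steps_and_keys → Spec_calc_product_of_all_paths steps_and_keys (calc_product_of_all_paths steps_and_keys)

-- ===== LEMMAS AND PROOFS =====
theorem flatten_intersperse_nil {α : Type} (xs : List (List α)) :
    (List.intersperse [] xs).flatten = xs.flatten := by
  induction xs with
  | nil => simp
  | cons x xs ih => cases xs <;> simp_all [List.intersperse]

theorem join_empty_append_A (l : List String) :
    PySem.Str.join "" (l ++ ["A"]) = PySem.Str.join "" l ++ "A" := by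
  apply String.toList_inj.mp
  simp [PySem.Str.join, PySem.Chars.join, List.intercalate, flatten_intersperse_nil]

def keyF (sak : String × String × List (List String)) : List String :=
  sak.2.2.map (fun keys => PySem.Str.join "" (keys ++ ["A"]))

def prodStrings (sk : List (String × String × List (List String))) : List String :=
  (pvProduct (sk.map keyF)).map (PySem.Str.join "")

-- total number of combinations
def totalN (os : List (List String)) : Nat := (os.map List.length).prod

-- mixed-radix decoding, leftmost digit most significant
def decode : List (List String) → Nat → List String
  | [], _ => []
  | o :: rest, k => o.getD (k / totalN rest) "" :: decode rest (k % totalN rest)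

theorem totalN_nil : totalN [] = 1 := rfl

theorem totalN_cons (o : List String) (os : List (List String)) :
    totalN (o :: os) = o.length * totalN os := by simp [totalN]

theorem totalN_append_singleton (os : List (List String)) (o : List String) :
    totalN (os ++ [o]) = totalN os * o.length := by simp [totalN]

theorem length_pvProduct (os : List (List String)) :
    (pvProduct os).length = totalN os := by
  induction os with
  | nil => rfl
  | cons o os ih =>
      simp [pvProduct, totalN_cons, List.length_flatMap, ih, List.map_const']

theorem getD_range_map (os : List String) (d : String) :
    (List.range os.length).map (fun i => os.getD i d) = os := by
  apply List.ext_getElem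
  · simp
  · intro i h1 h2
    simp_all [List.getD_eq_getElem?_getD]

theorem range_mul (n m : Nat) :
    List.range (n * m) = (List.range n).flatMap (fun i => (List.range m).map (fun j => i * m + j)) := by
  induction n with
  | zero => simp
  | succ n ih =>
      have : (n + 1) * m = n * m + m := by ring
      rw [this, List.range_add, List.range_succ, List.flatMap_append, ← ih]
      simp

theorem map_decode_range (os : List (List String)) :
    (List.range (totalN os)).map (decode os) = pvProduct os := by
  induction os with
  | nil => simp [totalN_nil, decode, pvProduct, List.range_succ]
  | cons o os ih =>
      rw [totalN_cons]
      by_cases hm : totalN os = 0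
      · have hnil : pvProduct os = [] := by
          have := length_pvProduct os
          rw [hm] at this
          exact List.eq_nil_of_length_eq_zero this
        simp [hm, pvProduct, hnil]
      · have hm0 : 0 < totalN os := Nat.pos_of_ne_zero hm
        rw [range_mul, List.map_flatMap]
        have hstep : ∀ i ∈ List.range o.length,
            ((List.range (totalN os)).map (fun j => i * totalN os + j)).map (decode (o :: os))
              = (pvProduct os).map (fun t => o.getD i "" :: t) := by
          intro i _
          rw [List.map_map, ← ih, List.map_map]
          apply List.map_congr_left
          intro j hj
          have hjlt : j < totalN os := List.mem_range.mp hj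
          simp only [Function.comp_def, decode]
          have h1 : (i * totalN os + j) / totalN os = i := by
            rw [Nat.add_comm, Nat.add_mul_div_right _ _ hm0, Nat.div_eq_of_lt hjlt]
            omega
          have h2 : (i * totalN os + j) % totalN os = j := by
            rw [Nat.add_comm, Nat.add_mul_mod_self_right, Nat.mod_eq_of_lt hjlt]
          rw [h1, h2]
        have h2 : pvProduct (o :: os)
            = (List.range o.length).flatMap (fun i => (pvProduct os).map (fun t => o.getD i "" :: t)) := by
          conv_lhs => rw [show pvProduct (o :: os) = o.flatMap (fun x => (pvProduct os).map (fun t => x :: t)) from rfl,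
                          ← getD_range_map o ""]
          rw [List.flatMap_def, List.flatMap_def, List.map_map]
          rfl
        rw [h2, List.flatMap_def, List.flatMap_def]
        congr 1
        exact List.map_congr_left hstep

theorem decode_append_singleton (os : List (List String)) (o : List String) :
    ∀ k : Nat, k < totalN (os ++ [o]) →
    decode (os ++ [o]) k = decode os (k / o.length) ++ [o.getD (k % o.length) ""] := by
  induction os with
  | nil =>
      intro k hk
      rw [totalN_append_singleton, totalN_nil, Nat.one_mul] at hk
      simp [decode, totalN_nil, Nat.mod_eq_of_lt hk]
  | cons a os ih =>
      intro k hk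
      simp only [List.cons_append] at hk ⊢
      rw [totalN_cons] at hk
      have hT : 0 < totalN (os ++ [o]) := by
        rcases Nat.eq_zero_or_pos (totalN (os ++ [o])) with h0 | h
        · rw [h0, Nat.mul_zero] at hk
          exact absurd hk (Nat.not_lt_zero k)
        · exact h
      have hk' : k % totalN (os ++ [o]) < totalN (os ++ [o]) := Nat.mod_lt _ hT
      have hTe : totalN (os ++ [o]) = totalN os * o.length := totalN_append_singleton os o
      have e1 : k / totalN (os ++ [o]) = k / o.length / totalN os := by
        rw [hTe, Nat.div_div_eq_div_mul, Nat.mul_comm]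
      have e2 : k % totalN (os ++ [o]) / o.length = k / o.length % totalN os := by
        rw [hTe, Nat.mul_comm (totalN os) o.length, Nat.mod_mul_right_div_self]
      have e3 : k % totalN (os ++ [o]) % o.length = k % o.length := by
        rw [hTe]
        exact Nat.mod_mod_of_dvd k ⟨totalN os, Nat.mul_comm _ _⟩
      rw [show decode (a :: (os ++ [o])) k
            = a.getD (k / totalN (os ++ [o])) "" :: decode (os ++ [o]) (k % totalN (os ++ [o])) from rfl,
          ih _ hk', e1, e2, e3]
      rfl

-- the inner divmod loop computes the reversed decoding
theorem inner_fold (os : List (List String)) :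
    ∀ (k : Nat) (parts : List String), k < totalN os →
    os.reverse.foldl pvStep ((k : Int), parts)
      = (((k / totalN os : Nat) : Int), parts ++ (decode os k).reverse) := by
  induction os using List.reverseRecOn with
  | nil =>
      intro k parts hk
      rw [totalN_nil] at hk
      have hk0 : k = 0 := by omega
      subst hk0
      simp [decode, totalN_nil]
  | append_singleton os o ih =>
      intro k parts hk
      have hk2 := hk
      rw [totalN_append_singleton] at hk2
      have hL : 0 < o.length := by
        by_contra h
        have h0 : o.length = 0 := by omega
        rw [h0, Nat.mul_zero] at hk2
        omega
      have hk' : k / o.length < totalN os := (Nat.div_lt_iff_lt_mul hL).mpr hk2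
      have hd : PySem.Int.divmod? (k : Int) (o.length : Int)
          = some (((k / o.length : Nat) : Int), ((k % o.length : Nat) : Int)) := by
        unfold PySem.Int.divmod?
        split_ifs with h0
        · omega
        · simp [Int.fdiv_eq_ediv, Int.fmod_eq_emod]
      have hstep1 : pvStep ((k : Int), parts) o
          = (((k / o.length : Nat) : Int), parts ++ [o.getD (k % o.length) ""]) := by
        unfold pvStep
        rw [hd]
        simp only [PySem.List.pyGetD_natCast]
      rw [List.reverse_append, List.reverse_singleton, List.singleton_append, List.foldl_cons,
          hstep1, ih _ _ hk', decode_append_singleton os o k hk, totalN_append_singleton]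
      simp [Nat.div_div_eq_div_mul, Nat.mul_comm]

theorem total_foldl (os : List (List String)) (c : Int) :
    os.foldl (fun t o => t * (o.length : Int)) c = c * ((totalN os : Nat) : Int) := by
  induction os generalizing c with
  | nil => simp [totalN_nil]
  | cons o os ih =>
      rw [List.foldl_cons, ih, totalN_cons]
      push_cast
      ring

-- ===== VERDICT (by name: the statement is the Claim_ definition above) =====
theorem calc_product_of_all_paths_spec : Claim_equal_calc_product_of_all_paths := by
  intro sk _
  show calc_product_of_all_paths sk = calc_product_of_all_paths_alt sk
  have hA : calc_product_of_all_paths sk = prodStrings sk := by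
    simp only [calc_product_of_all_paths, PySem.List.foldl_append_singleton_eq_map,
               List.nil_append, prodStrings]
    rfl
  have hopts : sk.map (fun x => x.2.2.map (fun keys => PySem.Str.join "" keys ++ "A"))
      = sk.map keyF := by
    simp [keyF, join_empty_append_A]
  have hB : calc_product_of_all_paths_alt sk = prodStrings sk := by
    simp only [calc_product_of_all_paths_alt]
    rw [hopts, total_foldl, one_mul, PySem.List.pyRange_zero_nat, List.foldl_map,
        PySem.List.foldl_append_singleton_eq_map, List.nil_append]
    unfold prodStrings
    rw [← map_decode_range, List.map_map]
    apply List.map_congr_left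
    intro k hk
    have hk' : k < totalN (sk.map keyF) := List.mem_range.mp hk
    rw [inner_fold _ k [] hk']
    simp
  rw [hA, hB]
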